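-- pv_equiv track=rewrite | github.com/Ragarr/UC3M | Proyectos y practicas/1º/Programacion/Ejercicios y apuntes/s10-raa/ejercicio3.py | coincideIndice
-- ===== SOURCE A (Python) =====
-- def indiceElem(lista:list,elem)->tuple:
--     """devolvera una tupla con las posiciones de la lista en las que aparece el elemento dado
--     no puede devolver tuplas de un solo elemento"""
--     posiciones = list()
--     for i in range(len(lista)):
--         item=lista[i]
--         if item==elem and type(elem)==type(item):
--             posiciones.append(i)
--     posiciones = tuple(posiciones)
--     return posiciones
--
-- def coincideIndice(lista1:list,lista2:list, elem)->bool: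
--     """devuelve el indice de dos elementos que coincidan con mismo indice y valor en dos listas diferentes"""
--     posl1=indiceElem(lista1,elem)
--     posl2=indiceElem(lista2,elem)
--     for i in posl1:
--         for j in posl2:
--             if i==j:
--                 return i
--     return -1
--
-- lista1=[1,2,23,3,4,5,67,7,78,2,213,4354,56,546,7,8,8,0,123,4]
--
-- lista2=[4,2,6,5,67,8,6,4,24,56,3,78,8,3,21,12,54,5]
-- ===== SOURCE B (Python) =====
-- def coincideIndice(lista1: list, lista2: list, elem) -> int:
--     # Single pass over the paired prefixes: the first index where both lists
--     # hold elem (same type) is exactly the smallest common position.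
--     for i, (a, b) in enumerate(zip(lista1, lista2)):
--         if a == elem and b == elem and type(a) == type(elem) == type(b):
--             return i
--     return -1
-- ===== Notes on version B (the rewrite author's own statement) =====
-- stated objective: simpler
-- what changed: Instead of building the full position tuples of elem in both lists and intersecting them with nested loops, B makes one early-exit pass over zip(lista1, lista2) and returns the first index where both entries equal elem.
import Mathlib
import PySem

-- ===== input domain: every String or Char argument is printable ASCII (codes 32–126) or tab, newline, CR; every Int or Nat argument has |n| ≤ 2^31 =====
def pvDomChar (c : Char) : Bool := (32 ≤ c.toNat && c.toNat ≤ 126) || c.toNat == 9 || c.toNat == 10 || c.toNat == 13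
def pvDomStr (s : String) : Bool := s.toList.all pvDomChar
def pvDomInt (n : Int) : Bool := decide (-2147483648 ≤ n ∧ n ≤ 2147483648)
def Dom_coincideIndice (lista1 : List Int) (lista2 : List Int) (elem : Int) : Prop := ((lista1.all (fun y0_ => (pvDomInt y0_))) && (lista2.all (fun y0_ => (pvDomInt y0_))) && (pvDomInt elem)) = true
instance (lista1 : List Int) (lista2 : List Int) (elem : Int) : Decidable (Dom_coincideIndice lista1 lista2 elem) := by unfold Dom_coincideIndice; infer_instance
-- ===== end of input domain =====

-- B replaces the build-two-position-tuples-then-intersect scheme of A by a single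
-- early-exit pass over the paired prefixes of the two lists (simpler; same measured cost).


-- ===== PORT A =====
-- indiceElem: for i in range(len(lista)): append i if lista[i] == elem
-- (the Python 'type(elem)==type(item)' guard is identically true on List Int)
def indiceElem (lista : List Int) (elem : Int) : List Int :=
  (PySem.List.pyRange 0 (lista.length : Int) 1).foldl
    (fun posiciones i =>
      match PySem.List.pyGet? lista i with
      | some item => if item = elem then posiciones ++ [i] else posiciones
      | none => posiciones)
    []

-- inner loop: for j in posl2: if i == j: return i
def ciInner (i : Int) : List Int → Option Int
  | [] => none
  | j :: rest => if i = j then some i else ciInner i rest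

-- outer loop: for i in posl1: … ; return -1
def ciOuter (posl2 : List Int) : List Int → Int
  | [] => -1
  | i :: rest =>
    match ciInner i posl2 with
    | some v => v
    | none => ciOuter posl2 rest

def coincideIndice (lista1 : List Int) (lista2 : List Int) (elem : Int) : Int :=
  ciOuter (indiceElem lista2 elem) (indiceElem lista1 elem)

-- ===== PORT B =====
-- one pass over zip(lista1, lista2) with a running index
def ciGo (elem : Int) : List Int → List Int → Int → Int
  | a :: as_, b :: bs, i => if a = elem ∧ b = elem then i else ciGo elem as_ bs (i + 1)
  | _, _, _ => -1

def coincideIndice_alt (lista1 : List Int) (lista2 : List Int) (elem : Int) : Int :=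
  ciGo elem lista1 lista2 0

-- ===== PRECONDITION & SPEC =====
def Spec_coincideIndice (lista1 : List Int) (lista2 : List Int) (elem : Int) (out : Int) : Prop := out = coincideIndice_alt lista1 lista2 elem
instance (lista1 : List Int) (lista2 : List Int) (elem : Int) (out : Int) : Decidable (Spec_coincideIndice lista1 lista2 elem out) := by unfold Spec_coincideIndice; infer_instance

-- ===== CLAIM (what is proved, stated in full; the proofs are below) =====
def Claim_equal_coincideIndice : Prop := ∀ (lista1 : List Int) (lista2 : List Int) (elem : Int), Dom_coincideIndice lista1 lista2 elem → Spec_coincideIndice lista1 lista2 elem (coincideIndice lista1 lista2 elem)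

-- ===== LEMMAS AND PROOFS =====

-- recursive characterization of indiceElem's positions, with a running offset
def idxSpec (e : Int) : List Int → Int → List Int
  | [], _ => []
  | x :: t, k => if x = e then k :: idxSpec e t (k + 1) else idxSpec e t (k + 1)

theorem idxSpec_mem_ge (e : Int) (l : List Int) (k i : Int) (h : i ∈ idxSpec e l k) : k ≤ i := by
  induction l generalizing k with
  | nil => simp [idxSpec] at h
  | cons x t ih =>
    simp only [idxSpec] at h
    split at h
    · rcases List.mem_cons.mp h with h | h
      · omega
      · have := ih (k + 1) h; omega
    · have := ih (k + 1) h; omega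

theorem indiceElem_aux (e : Int) (full : List Int) (k : Nat) (acc : List Int) :
    (PySem.List.pyRange (k : Int) (full.length : Int) 1).foldl
      (fun posiciones i =>
        match PySem.List.pyGet? full i with
        | some item => if item = e then posiciones ++ [i] else posiciones
        | none => posiciones) acc
    = acc ++ idxSpec e (full.drop k) (k : Int) := by
  by_cases hk : k < full.length
  · rw [PySem.List.pyRange_one_cons (by exact_mod_cast hk)]
    have hget : PySem.List.pyGet? full (k : Int) = some full[k] :=
      PySem.List.pyGet?_ofNat full k hk
    have hdrop : full.drop k = full[k] :: full.drop (k + 1) :=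
      (List.getElem_cons_drop (as := full) (i := k) hk).symm
    have hrec := indiceElem_aux e full (k + 1)
    simp only [List.foldl_cons, hget]
    rw [hdrop]
    by_cases he : full[k] = e
    · simp only [idxSpec, if_pos he]
      have : ((k : Int) + 1) = ((k + 1 : Nat) : Int) := by push_cast; ring
      rw [this, hrec (acc ++ [(k : Int)])]
      simp
    · simp only [idxSpec, if_neg he]
      have : ((k : Int) + 1) = ((k + 1 : Nat) : Int) := by push_cast; ring
      rw [this, hrec acc]
  · have h1 : full.drop k = [] := List.drop_eq_nil_of_le (by omega)
    rw [PySem.List.pyRange_one_eq_nil (by exact_mod_cast Nat.le_of_not_lt hk)]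
    simp [h1, idxSpec]
termination_by full.length - k

theorem indiceElem_eq (l : List Int) (e : Int) : indiceElem l e = idxSpec e l 0 := by
  have := indiceElem_aux e l 0 []
  simpa [indiceElem] using this

theorem ciInner_none (i : Int) (p : List Int) (h : ∀ j ∈ p, j ≠ i) : ciInner i p = none := by
  induction p with
  | nil => rfl
  | cons j rest ih =>
    have hji : i ≠ j := fun hh => (h j (by simp)) (hh.symm)
    simp only [ciInner, if_neg hji]
    exact ih (fun j hj => h j (by simp [hj]))

theorem ciOuter_nil (p1 : List Int) : ciOuter [] p1 = -1 := by
  induction p1 with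
  | nil => rfl
  | cons i rest ih => simp [ciOuter, ciInner, ih]

theorem ciOuter_cons_ne (p2 p1 : List Int) (j : Int) (h : ∀ i ∈ p1, i ≠ j) :
    ciOuter (j :: p2) p1 = ciOuter p2 p1 := by
  induction p1 with
  | nil => rfl
  | cons i rest ih =>
    have hij : i ≠ j := h i (by simp)
    simp only [ciOuter, ciInner, if_neg hij]
    rw [ih (fun x hx => h x (by simp [hx]))]

theorem main_aux (e : Int) (l1 : List Int) : ∀ (l2 : List Int) (k : Int),
    ciOuter (idxSpec e l2 k) (idxSpec e l1 k) = ciGo e l1 l2 k := by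
  induction l1 with
  | nil => intro l2 k; simp [idxSpec, ciOuter, ciGo]
  | cons a as ih =>
    intro l2 k
    cases l2 with
    | nil =>
      simp only [idxSpec, ciGo]
      exact ciOuter_nil _
    | cons b bs =>
      by_cases ha : a = e
      · by_cases hb : b = e
        · simp [idxSpec, ha, hb, ciOuter, ciInner, ciGo]
        · have hknot : ∀ j ∈ idxSpec e bs (k + 1), j ≠ k := by
            intro j hj
            have := idxSpec_mem_ge e bs (k + 1) j hj; omega
          simp only [idxSpec, if_pos ha, if_neg hb, ciOuter,
            ciInner_none k _ hknot, ciGo, if_neg (by tauto : ¬ (a = e ∧ b = e))]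
          exact ih bs (k + 1)
      · by_cases hb : b = e
        · have hknot : ∀ i ∈ idxSpec e as (k + 1), i ≠ k := by
            intro i hi
            have := idxSpec_mem_ge e as (k + 1) i hi; omega
          simp only [idxSpec, if_neg ha, if_pos hb, ciGo,
            if_neg (by tauto : ¬ (a = e ∧ b = e))]
          rw [ciOuter_cons_ne _ _ _ hknot]
          exact ih bs (k + 1)
        · simp only [idxSpec, if_neg ha, if_neg hb, ciGo,
            if_neg (by tauto : ¬ (a = e ∧ b = e))]
          exact ih bs (k + 1)

-- ===== VERDICT (by name: the statement is the Claim_ definition above) =====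
theorem coincideIndice_spec : Claim_equal_coincideIndice := by
  intro l1 l2 e _
  unfold Spec_coincideIndice coincideIndice coincideIndice_alt
  rw [indiceElem_eq, indiceElem_eq]
  exact main_aux e l1 l2 0
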